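-- pv_equiv track=rewrite | github.com/rotfface/Skriptni-Jezici-Apeiron- | cats.py | wrong_words
-- ===== SOURCE A (Python) =====
-- def wrong_words(original, typed):
-- 	"""Uzima original dati paragraf/string i poredi sa unesenim te
-- 	vraća netačne riječi u tačnom obliku.
-- 	"""
--
-- 	if not original:
-- 		return [[]]
-- 	elif not typed:
-- 		return [list(original)]
-- 	elif original[0] != typed[0]:
-- 		return wrong_words(original[1:], typed[1:]) + [[original[0], typed[0]]]
-- 	else:
-- 		return wrong_words(original[1:], typed[1:])
-- ===== SOURCE B (Python) =====
-- def wrong_words(original, typed):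
--     """Uzima original dati paragraf/string i poredi sa unesenim te
--     vraća netačne riječi u tačnom obliku.
--     """
--     if len(original) <= len(typed):
--         base = [[]]
--     else:
--         base = [list(original[len(typed):])]
--     mism = [[o, t] for o, t in zip(original, typed) if o != t]
--     mism.reverse()
--     return base + mism
-- ===== Notes on version B (the rewrite author's own statement) =====
-- stated objective: faster
-- what changed: Replaced the O(n^2) slicing recursion with a single linear pass: one zip-comprehension collects the mismatched pairs, which are reversed and appended after the closed-form base element.
import Mathlib
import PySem

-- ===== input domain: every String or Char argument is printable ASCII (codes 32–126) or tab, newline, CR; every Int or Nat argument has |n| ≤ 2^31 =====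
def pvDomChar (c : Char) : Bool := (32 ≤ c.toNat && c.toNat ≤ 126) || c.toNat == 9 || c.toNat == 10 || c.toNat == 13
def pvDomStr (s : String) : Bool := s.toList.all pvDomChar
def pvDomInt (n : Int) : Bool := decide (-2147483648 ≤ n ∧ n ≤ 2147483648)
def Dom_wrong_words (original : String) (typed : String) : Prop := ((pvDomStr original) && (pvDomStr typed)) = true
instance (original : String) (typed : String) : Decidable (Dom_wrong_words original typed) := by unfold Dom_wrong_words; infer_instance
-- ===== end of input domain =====

-- B replaces A's O(n^2) slicing recursion by one linear pass over the zipped strings (mismatches collected, reversed, appended after the closed-form base element); proved to return the same value.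


-- ===== PORT A =====
-- A recurses on both strings, stripping the first character of each; ported as
-- structural recursion on the character lists (original[1:] = tail).
def wrongWordsAux : List Char → List Char → List (List String)
  | [], _ => [[]]
  | o0 :: orest, [] => [(o0 :: orest).map (fun c => String.mk [c])]
  | o0 :: orest, t0 :: trest =>
      if o0 ≠ t0 then wrongWordsAux orest trest ++ [[String.mk [o0], String.mk [t0]]]
      else wrongWordsAux orest trest

def wrong_words (original : String) (typed : String) : List (List String) :=
  wrongWordsAux original.toList typed.toList

-- ===== PORT B =====
-- B: closed-form base element, then the mismatched pairs from one pass over zip, reversed.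
def wrongWordsAltList (o : List Char) (t : List Char) : List (List String) :=
  (if o.length ≤ t.length then [([] : List String)] else [(o.drop t.length).map (fun c => String.mk [c])])
  ++ ((o.zip t).filterMap
        (fun p => if p.1 ≠ p.2 then some [String.mk [p.1], String.mk [p.2]] else none)).reverse

def wrong_words_alt (original : String) (typed : String) : List (List String) :=
  wrongWordsAltList original.toList typed.toList

-- ===== PRECONDITION & SPEC =====
def Spec_wrong_words (original : String) (typed : String) (out : List (List String)) : Prop := out = wrong_words_alt original typed
instance (original : String) (typed : String) (out : List (List String)) : Decidable (Spec_wrong_words original typed out) := by unfold Spec_wrong_words; infer_instance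

-- ===== CLAIM (what is proved, stated in full; the proofs are below) =====
def Claim_equal_wrong_words : Prop := ∀ (original : String) (typed : String), Dom_wrong_words original typed → Spec_wrong_words original typed (wrong_words original typed)

-- ===== LEMMAS AND PROOFS =====
theorem wrongWordsAux_eq_alt (o t : List Char) : wrongWordsAux o t = wrongWordsAltList o t := by
  induction o generalizing t with
  | nil => cases t <;> simp [wrongWordsAux, wrongWordsAltList]
  | cons o0 orest ih =>
    cases t with
    | nil => simp [wrongWordsAux, wrongWordsAltList]
    | cons t0 trest =>
      simp only [wrongWordsAux, wrongWordsAltList, List.zip_cons_cons, List.filterMap,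
        List.length_cons, List.drop_succ_cons]
      by_cases h : o0 = t0
      · simp [h, ih, wrongWordsAltList]
      · simp [h, ih, wrongWordsAltList, List.append_assoc]

-- ===== VERDICT (by name: the statement is the Claim_ definition above) =====
theorem wrong_words_spec : Claim_equal_wrong_words := by
  intro original typed _
  unfold Spec_wrong_words wrong_words wrong_words_alt
  exact wrongWordsAux_eq_alt _ _
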